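-- pv_equiv track=rewrite | github.com/SohamD1/rag_backend_api | backend/app/services/tree_index.py | _mode_int
-- ===== SOURCE A (Python) =====
-- from collections import Counter
-- from typing import Any, Dict, List, Optional, Tuple
--
-- def _mode_int(values: List[int]) -> Optional[int]:
--     if not values:
--         return None
--     c = Counter(values)
--     best, best_count = None, 0
--     for k, count in c.items():
--         if count > best_count:
--             best, best_count = k, count
--         elif count == best_count and best is not None:
--             # Tie-break: prefer smaller absolute offset.
--             if abs(k) < abs(best):
--                 best = k
--     return best
-- ===== SOURCE B (Python) =====
-- from collections import Counter
-- from typing import List, Optional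
--
--
-- def _mode_int(values: List[int]) -> Optional[int]:
--     if not values:
--         return None
--     c = Counter(values)
--     m = max(c.values())
--     return min((k for k in c if c[k] == m), key=abs)
-- ===== Notes on version B (the rewrite author's own statement) =====
-- stated objective: simpler
-- what changed: A's single interleaved loop carrying a running (best, best_count) pair with an inline abs tie-break is replaced by a two-pass decomposition: compute the maximum frequency with max(c.values()), then select min(keys attaining it, key=abs).
import Mathlib
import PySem

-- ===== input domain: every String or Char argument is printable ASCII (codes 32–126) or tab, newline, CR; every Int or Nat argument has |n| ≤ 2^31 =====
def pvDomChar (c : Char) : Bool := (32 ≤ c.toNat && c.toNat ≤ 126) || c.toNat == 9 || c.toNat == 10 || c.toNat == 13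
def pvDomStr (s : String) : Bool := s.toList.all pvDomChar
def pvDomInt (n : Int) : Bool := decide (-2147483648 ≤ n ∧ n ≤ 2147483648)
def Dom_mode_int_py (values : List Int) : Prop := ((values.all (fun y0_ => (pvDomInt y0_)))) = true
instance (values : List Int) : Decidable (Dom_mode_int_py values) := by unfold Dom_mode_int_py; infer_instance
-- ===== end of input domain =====

-- B replaces A's single interleaved running-best/abs-tie loop with a two-pass decomposition
-- (compute the max frequency, then pick min-by-abs among the keys attaining it); objective: simpler.

-- ===== PORT A =====
-- the body of A's `for k, count in c.items()` loop, step for step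
def aStep (st : Option Int × Int) (kc : Int × Int) : Option Int × Int :=
  if kc.2 > st.2 then (some kc.1, kc.2)
  else
    match st.1 with
    | none => st
    | some b => if kc.2 = st.2 then (if |kc.1| < |b| then (some kc.1, st.2) else st) else st

def mode_int_py (values : List Int) : Option Int :=
  if values = [] then none
  else
    let c := PySem.Dict.counter values
    (c.items.foldl aStep (none, 0)).1

-- ===== PORT B =====
def mode_int_py_alt (values : List Int) : Option Int :=
  if values = [] then none
  else
    let c := PySem.Dict.counter values
    -- m = max(c.values()): c.values() is nonempty here, so max? is some; getD 0 just unwraps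
    let m := (PySem.List.max? c.values (fun x => x)).getD 0
    -- min((k for k in c if c[k] == m), key=abs); c[k] = getD k 0 is exact for k ∈ c
    PySem.List.min? (c.keys.filter (fun k => c.getD k 0 = m)) (fun k => |k|)

-- ===== PRECONDITION & SPEC =====
def Spec_mode_int_py (values : List Int) (out : Option Int) : Prop := out = mode_int_py_alt values
instance (values : List Int) (out : Option Int) : Decidable (Spec_mode_int_py values out) := by unfold Spec_mode_int_py; infer_instance

-- ===== CLAIM (what is proved, stated in full; the proofs are below) =====
def Claim_equal_mode_int_py : Prop := ∀ (values : List Int), Dom_mode_int_py values → Spec_mode_int_py values (mode_int_py values)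

-- ===== LEMMAS AND PROOFS =====

-- A's running best, unrolled over the distinct keys `ks` with count function `cnt`
def selK (cnt : Int → Int) : Int → Int → List Int → Int
  | b, _, [] => b
  | b, bc, k :: t =>
      if bc < cnt k then selK cnt k (cnt k) t
      else if cnt k = bc ∧ |k| < |b| then selK cnt k bc t
      else selK cnt b bc t

theorem consIf (P : Prop) [Decidable P] (k : Int) (l : List Int) :
    (if P then [k] else []) ++ l = if P then k :: l else l := by
  split_ifs <;> simp

theorem min?_cons_cons_lt (b k : Int) (X : List Int) (h : |k| < |b|) :
    PySem.List.min? (b :: k :: X) (fun x => |x|) = PySem.List.min? (k :: X) (fun x => |x|) := by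
  simp [PySem.List.min?, h]

theorem min?_cons_cons_ge (b k : Int) (X : List Int) (h : ¬ |k| < |b|) :
    PySem.List.min? (b :: k :: X) (fun x => |x|) = PySem.List.min? (b :: X) (fun x => |x|) := by
  simp [PySem.List.min?, h]

-- Lemma 1: A's fold from a live state (some b, bc) computes (selK, running max count).
theorem foldA_eq (cnt : Int → Int) :
    ∀ (ks : List Int) (b bc : Int),
      (ks.map (fun k => (k, cnt k))).foldl aStep (some b, bc)
        = (some (selK cnt b bc ks), ks.foldl (fun a k => max a (cnt k)) bc) := by
  intro ks
  induction ks with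
  | nil => intro b bc; simp [selK]
  | cons k t ih =>
      intro b bc
      simp only [List.map_cons, List.foldl_cons]
      by_cases h1 : bc < cnt k
      · have hstep : aStep (some b, bc) (k, cnt k) = (some k, cnt k) := by
          simp [aStep, h1]
        rw [hstep, ih, selK, if_pos h1, max_eq_right (le_of_lt h1)]
      · by_cases h2 : cnt k = bc
        · by_cases h3 : |k| < |b|
          · have hstep : aStep (some b, bc) (k, cnt k) = (some k, bc) := by
              simp [aStep, h2, h3]
            rw [hstep, ih, selK, if_neg h1, if_pos ⟨h2, h3⟩, max_eq_left (not_lt.mp h1)]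
          · have hstep : aStep (some b, bc) (k, cnt k) = (some b, bc) := by
              simp [aStep, h2, h3]
            rw [hstep, ih, selK, if_neg h1, if_neg (by tauto), max_eq_left (not_lt.mp h1)]
        · have hstep : aStep (some b, bc) (k, cnt k) = (some b, bc) := by
            simp [aStep, h2]
            omega
          rw [hstep, ih, selK, if_neg h1, if_neg (by tauto), max_eq_left (not_lt.mp h1)]

-- Lemma 2: B's filter-then-first-min-by-abs, started from a live best (b, bc), equals selK.
theorem minFilter_eq (cnt : Int → Int) :
    ∀ (ks : List Int) (b bc : Int),
      PySem.List.min?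
        ((if bc = ks.foldl (fun a k => max a (cnt k)) bc then [b] else [])
          ++ ks.filter (fun k => cnt k = ks.foldl (fun a k => max a (cnt k)) bc))
        (fun k => |k|)
        = some (selK cnt b bc ks) := by
  intro ks
  induction ks with
  | nil => intro b bc; simp [selK, PySem.List.min?]
  | cons k t ih =>
      intro b bc
      simp only [List.foldl_cons, List.filter_cons, decide_eq_true_eq]
      by_cases h1 : bc < cnt k
      · simp only [max_eq_right (le_of_lt h1)]
        have hM := (PySem.List.le_foldl_max_int t cnt (cnt k)).1
        rw [if_neg (by omega : ¬ bc = t.foldl (fun a k => max a (cnt k)) (cnt k))]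
        rw [selK, if_pos h1]
        have := ih k (cnt k)
        rw [consIf] at this
        simpa using this
      · simp only [max_eq_left (not_lt.mp h1)]
        have hM := (PySem.List.le_foldl_max_int t cnt bc).1
        by_cases h2 : cnt k = bc
        · by_cases hMeq : bc = t.foldl (fun a k => max a (cnt k)) bc
          · rw [if_pos hMeq, if_pos (h2.trans hMeq)]
            by_cases h3 : |k| < |b|
            · rw [selK, if_neg h1, if_pos ⟨h2, h3⟩, List.singleton_append,
                min?_cons_cons_lt b k _ h3]
              have := ih k bc
              rw [if_pos hMeq, List.singleton_append] at this
              exact this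
            · rw [selK, if_neg h1, if_neg (by tauto), List.singleton_append,
                min?_cons_cons_ge b k _ h3]
              have := ih b bc
              rw [if_pos hMeq, List.singleton_append] at this
              exact this
          · rw [if_neg hMeq, if_neg (show ¬ cnt k = t.foldl (fun a k => max a (cnt k)) bc by rw [h2]; exact hMeq), List.nil_append]
            by_cases h3 : |k| < |b|
            · rw [selK, if_neg h1, if_pos ⟨h2, h3⟩]
              have := ih k bc
              rw [if_neg hMeq, List.nil_append] at this
              exact this
            · rw [selK, if_neg h1, if_neg (by tauto)]
              have := ih b bc
              rw [if_neg hMeq, List.nil_append] at this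
              exact this
        · have hklt : cnt k < bc := lt_of_le_of_ne (not_lt.mp h1) h2
          rw [if_neg (by omega : ¬ cnt k = t.foldl (fun a k => max a (cnt k)) bc)]
          rw [selK, if_neg h1, if_neg (show ¬ (cnt k = bc ∧ |k| < |b|) by tauto)]
          exact ih b bc

-- ===== VERDICT (by name: the statement is the Claim_ definition above) =====
theorem mode_int_py_spec : Claim_equal_mode_int_py := by
  intro values _
  unfold Spec_mode_int_py mode_int_py mode_int_py_alt
  by_cases hne : values = []
  · simp [hne]
  · simp only [if_neg hne]
    set cnt : Int → Int := fun k => (values.count k : Int) with hcnt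
    obtain ⟨v, ks', hks⟩ : ∃ v ks', PySem.Set.ofList values = v :: ks' := by
      obtain ⟨w, ws, hw⟩ := List.exists_cons_of_ne_nil hne
      rw [hw, PySem.Set.ofList_cons]
      exact ⟨w, _, rfl⟩
    have hvmem : v ∈ values := by
      have : v ∈ PySem.Set.ofList values := by rw [hks]; exact List.mem_cons_self
      exact (PySem.Set.mem_ofList values v).mp this
    have hvpos : (0 : Int) < cnt v := by
      have h := List.count_pos_iff.mpr hvmem
      simp only [hcnt]
      exact_mod_cast h
    -- A's side
    have hA : ((PySem.Dict.counter values).items.foldl aStep (none, 0)).1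
        = some (selK cnt v (cnt v) ks') := by
      rw [PySem.Dict.items_counter, hks]
      simp only [List.map_cons, List.foldl_cons]
      have hstep : aStep (none, 0) (v, cnt v) = (some v, cnt v) := by
        simp [aStep, hvpos]
      rw [hstep, foldA_eq]
    rw [hA]
    -- B's side
    have hvals : (PySem.Dict.counter values).values = cnt v :: ks'.map cnt := by
      simp only [PySem.Dict.values, PySem.Dict.items_counter, hks, List.map_cons, List.map_map]
      rfl
    have hm : ((PySem.List.max? (PySem.Dict.counter values).values (fun x => x)).getD 0)
        = ks'.foldl (fun a k => max a (cnt k)) (cnt v) := by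
      rw [hvals, PySem.List.max?_id_cons]
      simp [List.foldl_map]
    rw [hm, PySem.Dict.keys_counter, hks]
    have hgetD : ∀ k, (PySem.Dict.counter values).getD k 0 = cnt k := fun k =>
      PySem.Dict.getD_counter values k
    simp only [List.filter_cons, hgetD, decide_eq_true_eq]
    rw [← minFilter_eq cnt ks' v (cnt v), consIf]
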